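-- pv_equiv track=rewrite | github.com/RobinPetit/INFOF-308 | source/lcc_size/LccCounter.py | get_permutations_that_sum_to
-- ===== SOURCE A (Python) =====
-- def get_permutations_that_sum_to(value, nb_elements, beg=0, end=-1):
--     '''generating function that yields all integer vectors of given size that
--     sum to a given value'''
--     if end < 0:
--         end=value
--     if end < beg or nb_elements * beg > value or nb_elements * end < value:
--         raise StopIteration
--     perm = [beg] * nb_elements
--     s = beg*nb_elements  # keep track of the current value of the sum
--     # Loop can be optimized...
--     while True:
--         if s > value:
--             s += end + 1 - perm[-1]
--             perm[-1] = end+1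
--         elif s == value:
--             yield perm
--             perm[-1] += 1
--             s += 1
--         else:
--             perm[-1] += value-s
--             s = value
--         idx = nb_elements-1
--         # rearrange vector so that each element is in {beg, ..., end}
--         while idx >= 1 and perm[idx] > end:
--             perm[idx-1] += 1
--             s += 1 + beg - perm[idx]
--             perm[idx] = beg
--             idx -= 1
--         if perm[0] > end:
--             break
-- ===== SOURCE B (Python) =====
-- def get_permutations_that_sum_to(value, nb_elements, beg=0, end=-1):
--     '''generating function that yields all integer vectors of given size that
--     sum to a given value'''
--     if end < 0:
--         end = value
--     if end < beg or nb_elements * beg > value or nb_elements * end < value: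
--         raise StopIteration
--     # Treat the buffer as an odometer over [beg, end], most significant digit
--     # first, whose last digit is determined by the target sum: per prefix,
--     # emit the single candidate for the last slot when it lands in [beg, end].
--     perm = [beg] * nb_elements
--     while True:
--         last = value - sum(perm[:-1])
--         if beg <= last <= end:
--             perm[-1] = last
--             yield perm
--         # advance: the determined digit is always exhausted, so overflow it
--         # and let the carry ripple into the free digits
--         perm[-1] = end + 1
--         i = nb_elements - 1
--         while i > 0 and perm[i] > end:
--             perm[i] = beg
--             i -= 1
--             perm[i] += 1
--         if perm[0] > end:
--             return
-- ===== Notes on version B (the rewrite author's own statement) =====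
-- stated objective: simpler
-- what changed: A interleaves yielding and carrying through an incrementally maintained running sum s with three-way s</=/> branching that jumps, re-checks and over-counts the sum across iterations; B drops the running-sum state machine entirely: per prefix it computes the determined last slot directly as value - sum(perm[:-1]), emits it when in range, and advances one plain overflow-carry odometer.
import Mathlib
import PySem

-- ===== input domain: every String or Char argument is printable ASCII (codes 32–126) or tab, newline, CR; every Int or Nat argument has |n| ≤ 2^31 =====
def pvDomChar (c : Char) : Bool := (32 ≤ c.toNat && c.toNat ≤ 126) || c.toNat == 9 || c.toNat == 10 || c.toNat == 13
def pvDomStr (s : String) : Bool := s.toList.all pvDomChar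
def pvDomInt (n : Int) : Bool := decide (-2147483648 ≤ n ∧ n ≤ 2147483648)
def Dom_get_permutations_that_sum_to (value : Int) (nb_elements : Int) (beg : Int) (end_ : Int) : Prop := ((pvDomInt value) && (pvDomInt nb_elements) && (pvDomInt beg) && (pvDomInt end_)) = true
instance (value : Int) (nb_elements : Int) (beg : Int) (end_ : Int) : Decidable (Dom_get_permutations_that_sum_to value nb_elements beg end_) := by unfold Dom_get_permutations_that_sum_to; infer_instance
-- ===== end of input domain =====

-- B replaces A's running-sum state machine (three-way s</=/> branching interleaved with
-- the carry) by a direct computation of the determined last slot per odometer prefix;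
-- objective: simpler, no speed claim.  Both Pythons are generators yielding ONE shared
-- buffer, so the value a caller materialises (list(...)) is k copies of the buffer's
-- final state; the ports return that materialised value.

-- fuel bound shared by both ports (a termination guard only: each port's outer loop
-- advances a prefix odometer, whose remaining number of steps this computes)
def rankOdo (end_ beg : Int) : List Int → Nat
  | [] => 0
  | x :: ys => (end_ - x).toNat + (end_ - beg + 1).toNat * rankOdo end_ beg ys

-- ===== PORT A =====
-- A is a generator that yields the SAME list object `perm` on every yield; the value a
-- caller materialises is therefore (number of yields) copies of perm's final state.  The
-- port runs A's loop literally (on the REVERSED perm, so that perm[-1] is the head and the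
-- inner `while idx >= 1 and perm[idx] > end` walk becomes structural recursion), counting
-- yields and keeping the buffer, and returns that materialised value.

-- inner while loop of A: r is perm reversed, s the running sum
def carryAux (end_ beg : Int) : Int → List Int → Int → List Int × Int
  | x, y :: rest, s =>
      if x > end_ then
        let p := carryAux end_ beg (y + 1) rest (s + 1 + beg - x)
        (beg :: p.1, p.2)
      else (x :: y :: rest, s)
  | x, [], s => ([x], s)

def carryA (end_ beg : Int) (r : List Int) (s : Int) : List Int × Int :=
  match r with
  | [] => (r, s)
  | x :: rest => carryAux end_ beg x rest s

-- outer `while True` of A (tail-recursive; cnt accumulates the yields so far):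
-- returns (number of yields, final reversed perm)
def loopA (value end_ beg : Int) : Nat → List Int → Int → Int → Int × List Int
  | 0, r, _, cnt => (cnt, r)  -- fuel exhaustion, proven unreachable for the fuel the port passes
  | fuel + 1, r, s, cnt =>
      let last := r.headD 0
      let r1 := if s > value then (end_ + 1) :: r.tail
                else if s = value then (last + 1) :: r.tail
                else (last + (value - s)) :: r.tail
      let s1 := if s > value then s + end_ + 1 - last
                else if s = value then s + 1
                else value
      let y : Int := if s > value then 0 else if s = value then 1 else 0
      let p := carryA end_ beg r1 s1
      if p.1.getLastD 0 > end_ then (cnt + y, p.1)   -- `if perm[0] > end: break`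
      else loopA value end_ beg fuel p.1 p.2 (cnt + y)

def get_permutations_that_sum_to (value : Int) (nb_elements : Int) (beg : Int) (end_ : Int) : List (List Int) :=
  let end2 := if end_ < 0 then value else end_
  if end2 < beg ∨ nb_elements * beg > value ∨ nb_elements * end2 < value then []
  else
    let n := nb_elements.toNat
    let r0 : List Int := List.replicate n beg          -- perm (reversed; all entries equal)
    let fuel := 3 * rankOdo end2 beg (List.replicate (n - 1) beg) + 3
    let p := loopA value end2 beg fuel r0 (beg * nb_elements) 0
    List.replicate p.1.toNat p.2.reverse               -- list(A(...)): k aliases of the final buffer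

-- ===== PORT B =====
-- Source B is also a generator over one shared buffer; the port runs its loop on the REVERSED
-- perm (head = perm[-1], tail = the prefix least-significant first), counting yields, and
-- returns the materialised value (k copies of the final buffer).

-- Source B's inner carry `perm[i] += 1; while i > 0 and perm[i] > end: perm[i] = beg; i -= 1;
-- perm[i] += 1`, on the reversed prefix: y is the just-incremented slot, rest the rest
def succB (end_ beg : Int) : Int → List Int → List Int
  | y, [] => [y]
  | y, z :: rest => if y > end_ then beg :: succB end_ beg (z + 1) rest else y :: z :: rest

-- Source B's outer `while True` (r is perm reversed; the write perm[-1] = last is immediately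
-- overwritten by perm[-1] = end + 1, so only the yield count survives it)
def loopB (value end_ beg : Int) : Nat → List Int → Int → Int × List Int
  | 0, r, cnt => (cnt, r)  -- fuel exhaustion, proven unreachable for the fuel the port passes
  | fuel + 1, r, cnt =>
      let last := value - r.tail.sum                   -- value - sum(perm[:-1])
      let cnt1 := if beg ≤ last ∧ last ≤ end_ then cnt + 1 else cnt
      let r2 := succB end_ beg (end_ + 1) r.tail       -- perm[-1] = end + 1; carry walk
      if r2.getLastD 0 > end_ then (cnt1, r2)          -- `if perm[0] > end: return`
      else loopB value end_ beg fuel r2 cnt1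

def get_permutations_that_sum_to_alt (value : Int) (nb_elements : Int) (beg : Int) (end_ : Int) : List (List Int) :=
  let end2 := if end_ < 0 then value else end_
  if end2 < beg ∨ nb_elements * beg > value ∨ nb_elements * end2 < value then []
  else
    let n := nb_elements.toNat
    let r0 : List Int := List.replicate n beg
    let fuel := rankOdo end2 beg (List.replicate (n - 1) beg) + 1
    let p := loopB value end2 beg fuel r0 0
    List.replicate p.1.toNat p.2.reverse

-- ===== PRECONDITION & SPEC =====
-- Pre_ excludes exactly the inputs where A raises: the three parameter guards
-- (`raise StopIteration`, RuntimeError under PEP 479) and nb_elements < 1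
-- (perm[-1] on the empty buffer, IndexError).
def Pre_get_permutations_that_sum_to (value : Int) (nb_elements : Int) (beg : Int) (end_ : Int) : Prop :=
  beg ≤ (if end_ < 0 then value else end_) ∧ nb_elements * beg ≤ value ∧
    value ≤ nb_elements * (if end_ < 0 then value else end_) ∧ 1 ≤ nb_elements
instance (value : Int) (nb_elements : Int) (beg : Int) (end_ : Int) : Decidable (Pre_get_permutations_that_sum_to value nb_elements beg end_) := by unfold Pre_get_permutations_that_sum_to; infer_instance

def pvWitness_get_permutations_that_sum_to : Int × Int × Int × Int := (3, 2, 0, -1)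

def Spec_get_permutations_that_sum_to (value : Int) (nb_elements : Int) (beg : Int) (end_ : Int) (out : List (List Int)) : Prop := out = get_permutations_that_sum_to_alt value nb_elements beg end_
instance (value : Int) (nb_elements : Int) (beg : Int) (end_ : Int) (out : List (List Int)) : Decidable (Spec_get_permutations_that_sum_to value nb_elements beg end_ out) := by unfold Spec_get_permutations_that_sum_to; infer_instance

-- ===== CLAIM (what is proved, stated in full; the proof is below) =====
def Claim_equal_get_permutations_that_sum_to : Prop := ∀ (value : Int) (nb_elements : Int) (beg : Int) (end_ : Int), Dom_get_permutations_that_sum_to value nb_elements beg end_ → Pre_get_permutations_that_sum_to value nb_elements beg end_ → Spec_get_permutations_that_sum_to value nb_elements beg end_ (get_permutations_that_sum_to value nb_elements beg end_)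

-- ===== LEMMAS AND PROOFS =====

-- 0/1 indicator: the forced last element v is admissible
def chi (beg end_ v : Int) : Int := if beg ≤ v ∧ v ≤ end_ then 1 else 0

-- number of box vectors of a given length summing to v (a proof-side counting function)
def countB (beg end_ : Int) : Nat → Int → Int
  | 0, v => if v = 0 then 1 else 0
  | n + 1, v =>
      let lo := max beg (v - (n : Int) * end_)
      let hi := min end_ (v - (n : Int) * beg)
      (PySem.List.pyRange lo (hi + 1) 1).foldl (fun acc x => acc + countB beg end_ n (v - x)) 0

-- number of admissible prefixes ≥ q in the common enumeration order (q most-significant-first),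
-- counted against countB subtrees to the right of each position
def tailCnt (beg end_ : Int) : Int → List Int → Int
  | v, [] => chi beg end_ v
  | v, x :: q' =>
      tailCnt beg end_ (v - x) q' +
        ((PySem.List.pyRange (x + 1) (end_ + 1) 1).map
          (fun x' => countB beg end_ (q'.length + 1) (v - x'))).sum

theorem carryA_cons (e b x : Int) (l : List Int) (s : Int) :
    carryA e b (x :: l) s = carryAux e b x l s := rfl

-- carryA does nothing when the head is in range
theorem carry_id (e b x : Int) (qr : List Int) (s : Int) (hx : x ≤ e) :
    carryA e b (x :: qr) s = (x :: qr, s) := by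
  cases qr with
  | nil => simp [carryA, carryAux]
  | cons y rest => simp [carryA, carryAux, not_lt.mpr hx]

theorem carry_over0 (e b x s : Int) : carryA e b [x] s = ([x], s) := by
  simp [carryA, carryAux]

-- full cascade: every prefix entry is end_, the odometer overflows
theorem carry_over (e b : Int) :
    ∀ (m : Nat) (x s : Int), e < x →
      carryA e b (x :: List.replicate (m + 1) e) s
        = (List.replicate (m + 1) b ++ [e + 1], s + 1 + b - x + (m : Int) * (b - e)) := by
  intro m
  induction m with
  | zero =>
      intro x s hx
      simp only [List.replicate_succ, List.replicate_zero, carryA, carryAux, if_pos hx]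
      rw [Prod.mk.injEq]
      refine ⟨by simp, by push_cast; ring⟩
  | succ m ih =>
      intro x s hx
      have h1 : e < e + 1 := by omega
      rw [List.replicate_succ]
      simp only [carryA, carryAux, if_pos hx]
      rw [← carryA_cons, ih (e + 1) (s + 1 + b - x) h1]
      rw [Prod.mk.injEq]
      refine ⟨by simp [List.replicate_succ], by push_cast; ring⟩

-- partial cascade: j leading end_'s, then an incrementable entry y < end_
theorem carry_run (e b : Int) :
    ∀ (j : Nat) (x y : Int) (rest : List Int) (s : Int), e < x → y < e →
      carryA e b (x :: (List.replicate j e ++ y :: rest)) s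
        = (b :: (List.replicate j b ++ (y + 1) :: rest), s + 1 + b - x + (j : Int) * (b - e)) := by
  intro j
  induction j with
  | zero =>
      intro x y rest s hx hy
      simp only [List.replicate_zero, List.nil_append, carryA, carryAux, if_pos hx]
      rw [← carryA_cons, carry_id e b (y + 1) rest _ (by omega)]
      rw [Prod.mk.injEq]
      refine ⟨by simp, by push_cast; ring⟩
  | succ j ih =>
      intro x y rest s hx hy
      have h1 : e < e + 1 := by omega
      rw [List.replicate_succ]
      simp only [List.cons_append, carryA, carryAux, if_pos hx]
      rw [← carryA_cons, ih (e + 1) y rest (s + 1 + b - x) h1 hy]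
      rw [Prod.mk.injEq]
      refine ⟨by simp [List.replicate_succ], by push_cast; ring⟩

-- every list with entries ≤ e is all-e or has a first (least-significant) entry < e
theorem split_box (e : Int) : ∀ (qr : List Int), (∀ a ∈ qr, a ≤ e) →
    qr = List.replicate qr.length e ∨
      ∃ (j : Nat) (y : Int) (rest : List Int), qr = List.replicate j e ++ y :: rest ∧ y < e := by
  intro qr
  induction qr with
  | nil => intro _; left; rfl
  | cons x t ih =>
      intro hb
      have hx : x ≤ e := (hb x (by simp))
      rcases lt_or_eq_of_le hx with hlt | heq
      · right; exact ⟨0, x, t, by simp, hlt⟩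
      · rcases ih (fun a ha => hb a (by simp [ha])) with h | ⟨j, y, rest, hrw, hy⟩
        · left; rw [List.length_cons, List.replicate_succ, heq]; exact congrArg _ h
        · right; exact ⟨j + 1, y, rest, by rw [List.replicate_succ, heq, List.cons_append, hrw], hy⟩

-- the odometer successor decreases the remaining-steps rank by exactly one
theorem rank_succ (e b : Int) (he : b ≤ e) :
    ∀ (j : Nat) (y : Int) (rest : List Int), y < e →
      rankOdo e b (List.replicate j e ++ y :: rest)
        = rankOdo e b (List.replicate j b ++ (y + 1) :: rest) + 1 := by
  intro j
  induction j with
  | zero =>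
      intro y rest hy
      simp only [List.replicate_zero, List.nil_append, rankOdo]
      omega
  | succ j ih =>
      intro y rest hy
      rw [List.replicate_succ, List.replicate_succ]
      simp only [List.cons_append, rankOdo]
      rw [ih y rest hy]
      have hW : (e - b + 1).toNat = (e - b).toNat + 1 := by omega
      rw [hW]; ring_nf; omega

-- countB vanishes outside the reachable sum range
theorem countB_zero (b e : Int) :
    ∀ (m : Nat) (v : Int), (v < (m : Int) * b ∨ (m : Int) * e < v) → countB b e m v = 0 := by
  intro m
  induction m with
  | zero =>
      intro v hv
      simp only [Nat.cast_zero, zero_mul] at hv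
      simp only [countB]
      rw [if_neg (by omega)]
  | succ m ih =>
      intro v hv
      simp only [countB]
      rw [PySem.List.foldl_add, zero_add]
      apply List.sum_eq_zero
      intro z hz
      rcases List.mem_map.1 hz with ⟨x, hx, rfl⟩
      rcases PySem.List.mem_pyRange_one.1 hx with ⟨hx1, hx2⟩
      have hbx : b ≤ x := le_trans (le_max_left _ _) hx1
      have hxe : x ≤ e := by
        have := le_min_iff.1 (by omega : x ≤ min e (v - (m : Int) * b))
        exact this.1
      have hxvb : x ≤ v - (m : Int) * b := by
        have := le_min_iff.1 (by omega : x ≤ min e (v - (m : Int) * b))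
        exact this.2
      apply ih
      push_cast at hv
      rcases hv with h | h
      · left; nlinarith
      · right
        have hvme : v - (m : Int) * e ≤ x := le_trans (le_max_right _ _) hx1
        nlinarith

theorem countB_one (b e v : Int) : countB b e 1 v = chi b e v := by
  simp only [countB, chi, Nat.cast_zero, zero_mul, sub_zero]
  by_cases hc : b ≤ v ∧ v ≤ e
  · rw [max_eq_right hc.1, min_eq_right hc.2, PySem.List.pyRange_one_singleton]
    simp [if_pos hc]
  · rw [PySem.List.pyRange_one_eq_nil (by omega), if_neg hc]
    simp

-- the clamped range of countB can be widened to the full box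
theorem countB_full (b e : Int) (he : b ≤ e) (m : Nat) (v : Int) :
    countB b e (m + 1) v
      = ((PySem.List.pyRange b (e + 1) 1).map (fun x => countB b e m (v - x))).sum := by
  have hme : (m : Int) * b ≤ (m : Int) * e := by nlinarith [Int.natCast_nonneg m]
  simp only [countB]
  rw [PySem.List.foldl_add, zero_add]
  by_cases hle : max b (v - (m : Int) * e) ≤ min e (v - (m : Int) * b)
  · rw [PySem.List.pyRange_one_append b (max b (v - (m : Int) * e)) (e + 1)
        (le_max_left _ _) (by omega),
      PySem.List.pyRange_one_append (max b (v - (m : Int) * e))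
        (min e (v - (m : Int) * b) + 1) (e + 1) (by omega) (by omega)]
    rw [List.map_append, List.map_append, List.sum_append, List.sum_append]
    have hz1 : (((PySem.List.pyRange b (max b (v - (m : Int) * e)) 1).map
        (fun x => countB b e m (v - x)))).sum = 0 := by
      apply List.sum_eq_zero
      intro z hz
      rcases List.mem_map.1 hz with ⟨x, hx, rfl⟩
      rcases PySem.List.mem_pyRange_one.1 hx with ⟨hx1, hx2⟩
      exact countB_zero b e m _ (by right; omega)
    have hz2 : (((PySem.List.pyRange (min e (v - (m : Int) * b) + 1) (e + 1) 1).map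
        (fun x => countB b e m (v - x)))).sum = 0 := by
      apply List.sum_eq_zero
      intro z hz
      rcases List.mem_map.1 hz with ⟨x, hx, rfl⟩
      rcases PySem.List.mem_pyRange_one.1 hx with ⟨hx1, hx2⟩
      exact countB_zero b e m _ (by left; omega)
    rw [hz1, hz2]
    omega
  · rw [PySem.List.pyRange_one_eq_nil (show min e (v - (m : Int) * b) + 1 ≤
        max b (v - (m : Int) * e) by omega)]
    symm
    apply List.sum_eq_zero
    intro z hz
    rcases List.mem_map.1 hz with ⟨x, hx, rfl⟩
    rcases PySem.List.mem_pyRange_one.1 hx with ⟨hx1, hx2⟩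
    apply countB_zero b e m
    by_cases h : (m : Int) * e < v - x
    · right; exact h
    · left
      have h1 : max b (v - (m : Int) * e) ≤ x := by omega
      by_contra h2
      have h3 : x ≤ min e (v - (m : Int) * b) := by omega
      omega

theorem tailCnt_repE (b e : Int) :
    ∀ (m : Nat) (v : Int), tailCnt b e v (List.replicate m e) = chi b e (v - (m : Int) * e) := by
  intro m
  induction m with
  | zero => intro v; simp [tailCnt]
  | succ m ih =>
      intro v
      rw [List.replicate_succ]
      simp only [tailCnt]
      rw [PySem.List.pyRange_one_eq_nil le_rfl]
      simp only [List.map_nil, List.sum_nil, add_zero]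
      rw [ih (v - e)]
      congr 1
      push_cast; ring

theorem tailCnt_repB (b e : Int) (he : b ≤ e) :
    ∀ (m : Nat) (v : Int), tailCnt b e v (List.replicate m b) = countB b e (m + 1) v := by
  intro m
  induction m with
  | zero => intro v; simp only [List.replicate_zero, tailCnt]; rw [countB_one]
  | succ m ih =>
      intro v
      rw [List.replicate_succ]
      simp only [tailCnt, List.length_replicate]
      rw [ih (v - b)]
      rw [countB_full b e he (m + 1) v]
      rw [PySem.List.pyRange_one_cons (show b < e + 1 by omega)]
      simp [List.map_cons, List.sum_cons]

-- peeling the current prefix off tailCnt (stated along the carry shape, reversed)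
theorem tailCnt_succ (b e : Int) (he : b ≤ e) (j : Nat) (y : Int) (hy : y < e) :
    ∀ (p : List Int) (v : Int),
      tailCnt b e v (p ++ y :: List.replicate j e)
        = chi b e (v - (p.sum + y + (j : Int) * e))
            + tailCnt b e v (p ++ (y + 1) :: List.replicate j b) := by
  intro p
  induction p with
  | nil =>
      intro v
      simp only [List.nil_append, tailCnt, List.length_replicate, List.sum_nil]
      rw [tailCnt_repE, tailCnt_repB b e he j (v - (y + 1))]
      rw [PySem.List.pyRange_one_cons (show y + 1 < e + 1 by omega)]
      simp only [List.map_cons, List.sum_cons]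
      have h2 : v - y - (j : Int) * e = v - (0 + y + (j : Int) * e) := by ring
      rw [h2]
  | cons c p' ih =>
      intro v
      simp only [List.cons_append, tailCnt, List.sum_cons]
      have hlen : (p' ++ y :: List.replicate j e).length
          = (p' ++ (y + 1) :: List.replicate j b).length := by
        simp [List.length_append]
      rw [hlen, ih (v - c)]
      have h3 : v - c - (p'.sum + y + (j : Int) * e) = v - (c + p'.sum + y + (j : Int) * e) := by
        ring
      rw [h3]
      ring

-- the last element of a nonempty list with entries ≤ e is ≤ e
theorem getLastD_le (e z : Int) (l : List Int) (hz : z ≤ e) (hl : ∀ a ∈ l, a ≤ e) :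
    (z :: l).getLastD 0 ≤ e := by
  induction l generalizing z with
  | nil => simpa [List.getLastD]
  | cons w t ih =>
      have : (z :: w :: t).getLastD 0 = (w :: t).getLastD 0 := by
        simp [List.getLastD]
      rw [this]
      exact ih w (hl w (by simp)) (fun a ha => hl a (by simp [ha]))

-- the loop invariant for A: from the entry state of prefix qr, A's loop yields exactly the
-- number of admissible prefixes ≥ qr and leaves the buffer at [beg,...,beg,end_+1]
theorem loopA_main (value b e : Int) (hbe : b ≤ e) :
    ∀ (fuel : Nat) (qr : List Int) (cnt : Int), (∀ a ∈ qr, b ≤ a ∧ a ≤ e) →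
      (qr = [] → value ≤ e) → 3 * rankOdo e b qr + 3 ≤ fuel →
      loopA value e b fuel (b :: qr) (b + qr.sum) cnt
        = (cnt + tailCnt b e value qr.reverse, List.replicate qr.length b ++ [e + 1]) := by
  intro fuel
  induction fuel using Nat.strong_induction_on with
  | _ fuel IH =>
  intro qr cnt hbox hq1 hfuel
  obtain ⟨f, rfl⟩ : ∃ f, fuel = f + 1 := ⟨fuel - 1, by omega⟩
  -- the common tail of every branch: the buffer head has overflowed (head = x > e), the
  -- carry cascade advances the prefix odometer and the loop continues (or breaks)
  have casc : ∀ (f' : Nat) (x y' s1 : Int), f' < f + 1 → 3 * rankOdo e b qr ≤ f' → e < x →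
      (qr = [] → x = e + 1) → s1 = x + qr.sum →
      ((if (carryA e b (x :: qr) s1).1.getLastD 0 > e
        then (y', (carryA e b (x :: qr) s1).1)
        else loopA value e b f' (carryA e b (x :: qr) s1).1
               (carryA e b (x :: qr) s1).2 y') : Int × List Int)
        = (y' + (tailCnt b e value qr.reverse - chi b e (value - qr.sum)),
           List.replicate qr.length b ++ [e + 1]) := by
    intro f' x y' s1 hf' hf3 hx hx1 hs1
    subst hs1
    rcases split_box e qr (fun a ha => (hbox a ha).2) with hall | ⟨j, y, rest, hqr, hy⟩
    · -- all prefix entries are e: the odometer overflows, the loop breaks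
      rcases hL : qr.length with _ | m
      · have hqr0 : qr = [] := List.length_eq_zero_iff.mp hL
        subst hqr0
        rw [hx1 rfl, carry_over0]
        simp only [List.sum_nil, List.replicate_zero, List.nil_append, List.reverse_nil]
        rw [show ([e + 1] : List Int).getLastD 0 = e + 1 from rfl,
          if_pos (by omega : e + 1 > e)]
        simp only [tailCnt, sub_self, sub_zero]
        rw [Prod.mk.injEq]
        exact ⟨by ring, rfl⟩
      · have hqr2 : qr = List.replicate (m + 1) e := by rw [hall, hL]
        rw [hqr2, carry_over e b m x _ hx]
        simp only
        rw [List.getLastD_concat, if_pos (by omega : e + 1 > e)]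
        rw [List.reverse_replicate, tailCnt_repE]
        have hs : (List.replicate (m + 1) e).sum = ((m + 1 : Nat) : Int) * e := by
          rw [List.sum_replicate, nsmul_eq_mul]
        rw [hs]
        rw [Prod.mk.injEq]
        exact ⟨by ring, rfl⟩
    · -- partial cascade: advance the odometer and recurse
      rw [hqr, carry_run e b j x y rest _ hx hy]
      have hyb : b ≤ y := (hbox y (by simp [hqr])).1
      have hrest : ∀ a ∈ rest, b ≤ a ∧ a ≤ e := by
        intro a ha; exact hbox a (by simp [hqr, ha])
      have hlast : ¬ ((b :: (List.replicate j b ++ (y + 1) :: rest)).getLastD 0 > e) := by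
        rw [not_lt]
        apply getLastD_le e b _ hbe
        intro a ha
        simp only [List.mem_append, List.mem_cons, List.mem_replicate] at ha
        rcases ha with ⟨_, ha2⟩ | ha2 | ha
        · omega
        · omega
        · exact (hrest a ha).2
      rw [if_neg hlast]
      have hbox' : ∀ a ∈ List.replicate j b ++ (y + 1) :: rest, b ≤ a ∧ a ≤ e := by
        intro a ha
        simp only [List.mem_append, List.mem_cons, List.mem_replicate] at ha
        rcases ha with ⟨_, ha2⟩ | ha2 | ha
        · constructor <;> omega
        · constructor <;> omega
        · exact hrest a ha
      have hq1' : List.replicate j b ++ (y + 1) :: rest ≠ [] := by simp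
      have hrk : rankOdo e b qr = rankOdo e b (List.replicate j b ++ (y + 1) :: rest) + 1 := by
        rw [hqr]; exact rank_succ e b hbe j y rest hy
      have hfuel' : 3 * rankOdo e b (List.replicate j b ++ (y + 1) :: rest) + 3 ≤ f' := by
        omega
      have hs2 : x + (List.replicate j e ++ y :: rest).sum + 1 + b - x + (j : Int) * (b - e)
          = b + (List.replicate j b ++ (y + 1) :: rest).sum := by
        simp only [List.sum_append, List.sum_cons, List.sum_replicate, nsmul_eq_mul]
        ring
      rw [hs2]
      rw [IH f' hf' _ y' hbox' (fun h => absurd h hq1') hfuel']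
      rw [Prod.mk.injEq]
      refine ⟨?_, by simp⟩
      congr 1
      -- counting: peel the current prefix off tailCnt
      have hrev1 : (List.replicate j e ++ y :: rest).reverse
          = rest.reverse ++ y :: List.replicate j e := by
        simp [List.reverse_append, List.reverse_replicate]
      have hrev2 : (List.replicate j b ++ (y + 1) :: rest).reverse
          = rest.reverse ++ (y + 1) :: List.replicate j b := by
        simp [List.reverse_append, List.reverse_replicate]
      rw [hrev1, hrev2, tailCnt_succ b e hbe j y hy rest.reverse value]
      have hsum : rest.reverse.sum + y + (j : Int) * e
          = (List.replicate j e ++ y :: rest).sum := by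
        simp only [List.sum_reverse, List.sum_append, List.sum_cons, List.sum_replicate,
          nsmul_eq_mul]
        ring
      rw [hsum]
      ring
  -- one outer iteration from the entry state (buffer = beg :: qr, s = beg + sum qr)
  have hchi0 : ∀ w : Int, (w < b ∨ e < w) → chi b e w = 0 := by
    intro w hw; unfold chi; rw [if_neg (by omega)]
  have hchi1 : ∀ w : Int, b ≤ w → w ≤ e → chi b e w = 1 := by
    intro w h1 h2; unfold chi; rw [if_pos ⟨h1, h2⟩]
  simp only [loopA, List.headD_cons, List.tail_cons]
  rcases lt_trichotomy (b + qr.sum) value with hlt | heq | hgt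
  · -- s < value: jump the head to the forced last element
    simp only [if_neg (show ¬ (b + qr.sum > value) by omega),
      if_neg (show ¬ (b + qr.sum = value) by omega), add_zero]
    rw [show b + (value - (b + qr.sum)) = value - qr.sum by ring]
    by_cases hte : e < value - qr.sum
    · -- forced last out of range: overflow, no yield
      rw [casc f (value - qr.sum) cnt value (by omega) (by omega) hte
        (by intro h; exfalso; have := hq1 h; rw [h] at hte; simp at hte; omega) (by ring)]
      rw [hchi0 _ (Or.inr hte)]
      rw [Prod.mk.injEq]; exact ⟨by ring, rfl⟩
    · -- forced last in range: next iteration yields it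
      rw [carry_id e b _ qr _ (by omega)]
      rw [if_neg (by
        rw [not_lt]
        exact getLastD_le e _ qr (by omega) (fun a ha => (hbox a ha).2))]
      obtain ⟨f1, rfl⟩ : ∃ f1, f = f1 + 1 := ⟨f - 1, by omega⟩
      simp only [loopA, List.headD_cons, List.tail_cons]
      simp only [if_neg (show ¬ ((value : Int) > value) by omega),
        if_pos (rfl : (value : Int) = value), if_true]
      by_cases hte1 : e < value - qr.sum + 1
      · -- yielded at the box edge: overflow next
        rw [casc f1 (value - qr.sum + 1) (cnt + 1) (value + 1) (by omega) (by omega) hte1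
          (fun _ => by omega) (by ring)]
        rw [hchi1 _ (by omega) (by omega)]
        rw [Prod.mk.injEq]; exact ⟨by ring, rfl⟩
      · -- yielded inside the box: one more iteration overflows the head
        rw [carry_id e b _ qr _ (by omega)]
        rw [if_neg (by
          rw [not_lt]
          exact getLastD_le e _ qr (by omega) (fun a ha => (hbox a ha).2))]
        obtain ⟨f2, rfl⟩ : ∃ f2, f1 = f2 + 1 := ⟨f1 - 1, by omega⟩
        simp only [loopA, List.headD_cons, List.tail_cons]
        simp only [if_pos (show (value : Int) + 1 > value by omega), add_zero]
        rw [casc f2 (e + 1) (cnt + 1) (value + 1 + e + 1 - (value - qr.sum + 1)) (by omega)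
          (by omega) (by omega) (fun _ => rfl) (by ring)]
        rw [hchi1 _ (by omega) (by omega)]
        rw [Prod.mk.injEq]; exact ⟨by ring, rfl⟩
  · -- s = value: yield the current buffer
    simp only [if_neg (show ¬ (b + qr.sum > value) by omega), if_pos heq]
    by_cases hE : e < b + 1
    · -- box of width one: the incremented head overflows at once
      rw [casc f (b + 1) (cnt + 1) (b + qr.sum + 1) (by omega) (by omega) hE (fun _ => by omega)
        (by ring)]
      rw [hchi1 _ (by omega) (by omega)]
      rw [Prod.mk.injEq]; exact ⟨by ring, rfl⟩
    · -- head still in range: next iteration overflows it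
      rw [carry_id e b _ qr _ (by omega)]
      rw [if_neg (by
        rw [not_lt]
        exact getLastD_le e _ qr (by omega) (fun a ha => (hbox a ha).2))]
      obtain ⟨f1, rfl⟩ : ∃ f1, f = f1 + 1 := ⟨f - 1, by omega⟩
      simp only [loopA, List.headD_cons, List.tail_cons]
      simp only [if_pos (show b + qr.sum + 1 > value by omega), add_zero]
      rw [casc f1 (e + 1) (cnt + 1) (b + qr.sum + 1 + e + 1 - (b + 1)) (by omega) (by omega)
        (by omega) (fun _ => rfl) (by ring)]
      rw [hchi1 _ (by omega) (by omega)]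
      rw [Prod.mk.injEq]; exact ⟨by ring, rfl⟩
  · -- s > value: overflow the head immediately, no yield
    simp only [if_pos (show b + qr.sum > value by omega), add_zero]
    rw [casc f (e + 1) cnt (b + qr.sum + e + 1 - b) (by omega) (by omega) (by omega)
      (fun _ => rfl) (by ring)]
    rw [hchi0 _ (Or.inl (by omega))]
    rw [Prod.mk.injEq]; exact ⟨by ring, rfl⟩

-- A under Pre_, in closed form
theorem A_closed (value nb beg end_ : Int)
    (h1 : beg ≤ (if end_ < 0 then value else end_)) (h2 : nb * beg ≤ value)
    (h3 : value ≤ nb * (if end_ < 0 then value else end_)) (h4 : 1 ≤ nb) :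
    get_permutations_that_sum_to value nb beg end_
      = List.replicate (countB beg (if end_ < 0 then value else end_) nb.toNat value).toNat
          (((if end_ < 0 then value else end_) + 1) :: List.replicate (nb - 1).toNat beg) := by
  simp only [get_permutations_that_sum_to]
  have hguard : ¬((if end_ < 0 then value else end_) < beg ∨ nb * beg > value ∨
      nb * (if end_ < 0 then value else end_) < value) := by
    push_neg
    exact ⟨h1, h2, h3⟩
  rw [if_neg hguard]
  have hmi : (((nb - 1).toNat : Nat) : Int) = nb - 1 := Int.toNat_of_nonneg (by omega)
  have htn : nb.toNat = (nb - 1).toNat + 1 := by omega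
  rw [htn]
  have hbox : ∀ a ∈ List.replicate (nb - 1).toNat beg,
      beg ≤ a ∧ a ≤ (if end_ < 0 then value else end_) := by
    intro a ha
    rw [List.eq_of_mem_replicate ha]
    exact ⟨le_refl beg, h1⟩
  have hq1 : List.replicate (nb - 1).toNat beg = [] → value ≤ (if end_ < 0 then value else end_) := by
    intro h
    have hm0 : (nb - 1).toNat = 0 := by simpa using h
    have hnb1 : nb = 1 := by omega
    rw [hnb1, one_mul] at h3
    exact h3
  have hmain := loopA_main value beg (if end_ < 0 then value else end_) h1
    (3 * rankOdo (if end_ < 0 then value else end_) beg (List.replicate ((nb - 1).toNat + 1 - 1) beg) + 3)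
    (List.replicate (nb - 1).toNat beg) 0 hbox hq1 (by simp)
  rw [List.replicate_succ,
    show beg * nb = beg + (List.replicate (nb - 1).toNat beg).sum by
      rw [List.sum_replicate, nsmul_eq_mul, hmi]; ring]
  rw [hmain, zero_add]
  simp only [List.length_replicate, List.reverse_replicate]
  rw [tailCnt_repB beg (if end_ < 0 then value else end_) h1]
  simp [List.reverse_append]

-- succB leaves an in-range slot alone
theorem succB_id (e b y : Int) (rest : List Int) (hy : y ≤ e) :
    succB e b y rest = y :: rest := by
  cases rest with
  | nil => simp [succB]
  | cons z t => simp [succB, not_lt.mpr hy]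

-- succB: full cascade over an all-end_ tail (the odometer overflows)
theorem succB_over (e b : Int) :
    ∀ (m : Nat), succB e b (e + 1) (List.replicate m e) = List.replicate m b ++ [e + 1] := by
  intro m
  induction m with
  | zero => simp [succB]
  | succ m ih =>
      rw [List.replicate_succ]
      simp only [succB, if_pos (show e + 1 > e by omega)]
      rw [ih, List.replicate_succ]
      simp

-- succB: partial cascade, ending at an incrementable slot y < end_
theorem succB_carry (e b : Int) :
    ∀ (j : Nat) (x y : Int) (rest : List Int), e < x → y < e →
      succB e b x (List.replicate j e ++ y :: rest)
        = List.replicate (j + 1) b ++ (y + 1) :: rest := by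
  intro j
  induction j with
  | zero =>
      intro x y rest hx hy
      simp only [List.replicate_zero, List.nil_append, succB, if_pos hx]
      rw [succB_id e b (y + 1) rest (by omega)]
      simp [List.replicate_succ]
  | succ j ih =>
      intro x y rest hx hy
      rw [List.replicate_succ]
      simp only [List.cons_append, succB, if_pos hx]
      rw [ih (e + 1) y rest (by omega) hy]
      simp [List.replicate_succ]

-- the loop invariant for B: from the entry state (last slot lb, free digits q in the box),
-- B's loop yields the number of admissible prefixes ≥ q and leaves [beg,...,beg,end_+1]
theorem loopB_main (value b e : Int) (hbe : b ≤ e) :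
    ∀ (fuel : Nat) (q : List Int) (lb cnt : Int), (∀ a ∈ q, b ≤ a ∧ a ≤ e) →
      rankOdo e b q + 1 ≤ fuel →
      loopB value e b fuel (lb :: q) cnt
        = (cnt + tailCnt b e value q.reverse, List.replicate q.length b ++ [e + 1]) := by
  intro fuel
  induction fuel using Nat.strong_induction_on with
  | _ fuel IH =>
  intro q lb cnt hbox hfuel
  obtain ⟨f, rfl⟩ : ∃ f, fuel = f + 1 := ⟨fuel - 1, by omega⟩
  simp only [loopB, List.tail_cons]
  rcases split_box e q (fun a ha => (hbox a ha).2) with hall | ⟨j, y, rest, hqr, hy⟩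
  · -- every free digit is at e (or there is none): the odometer overflows, the loop returns
    obtain ⟨L, hL⟩ : ∃ L, q = List.replicate L e := ⟨q.length, hall⟩
    subst hL
    rw [succB_over e b L]
    rw [if_pos (by rw [List.getLastD_concat]; omega)]
    rw [Prod.mk.injEq]
    constructor
    · rw [List.reverse_replicate, tailCnt_repE]
      have hS : value - ((L : Nat) : Int) * e = value - (List.replicate L e).sum := by
        simp only [List.sum_replicate, nsmul_eq_mul]
      rw [hS]
      unfold chi
      split_ifs <;> ring
    · simp
  · -- an incrementable digit exists: advance the odometer and recurse
    have hyb : b ≤ y := (hbox y (by simp [hqr])).1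
    have hrest : ∀ a ∈ rest, b ≤ a ∧ a ≤ e := by
      intro a ha; exact hbox a (by simp [hqr, ha])
    have hbox1 : ∀ a ∈ List.replicate j b ++ (y + 1) :: rest, b ≤ a ∧ a ≤ e := by
      intro a ha
      simp only [List.mem_append, List.mem_cons, List.mem_replicate] at ha
      rcases ha with ⟨_, ha2⟩ | ha2 | ha
      · constructor <;> omega
      · constructor <;> omega
      · exact hrest a ha
    have hstep : succB e b (e + 1) q = b :: (List.replicate j b ++ (y + 1) :: rest) := by
      rw [hqr, succB_carry e b j (e + 1) y rest (by omega) hy, List.replicate_succ,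
        List.cons_append]
    rw [hstep]
    rw [if_neg (by
      rw [not_lt]
      apply getLastD_le e b _ hbe
      intro a ha
      simp only [List.mem_append, List.mem_cons, List.mem_replicate] at ha
      rcases ha with ⟨_, ha2⟩ | ha2 | ha
      · omega
      · omega
      · exact (hrest a ha).2)]
    have hrk : rankOdo e b q = rankOdo e b (List.replicate j b ++ (y + 1) :: rest) + 1 := by
      rw [hqr]; exact rank_succ e b hbe j y rest hy
    rw [IH f (by omega) (List.replicate j b ++ (y + 1) :: rest) b _ hbox1 (by omega)]
    rw [Prod.mk.injEq]
    constructor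
    · have hrev1 : q.reverse = rest.reverse ++ y :: List.replicate j e := by
        rw [hqr]; simp [List.reverse_append, List.reverse_replicate]
      have hrev2 : (List.replicate j b ++ (y + 1) :: rest).reverse
          = rest.reverse ++ (y + 1) :: List.replicate j b := by
        simp [List.reverse_append, List.reverse_replicate]
      rw [hrev1, hrev2, tailCnt_succ b e hbe j y hy rest.reverse value]
      have hX : rest.reverse.sum + y + (j : Int) * e = q.sum := by
        rw [hqr]
        simp only [List.sum_reverse, List.sum_append, List.sum_cons, List.sum_replicate,
          nsmul_eq_mul]
        push_cast
        ring
      rw [hX]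
      unfold chi
      split_ifs <;> ring
    · rw [hqr]
      simp only [List.length_append, List.length_cons, List.length_replicate]

-- B under Pre_, in the same closed form as A
theorem B_closed (value nb beg end_ : Int)
    (h1 : beg ≤ (if end_ < 0 then value else end_)) (h2 : nb * beg ≤ value)
    (h3 : value ≤ nb * (if end_ < 0 then value else end_)) (h4 : 1 ≤ nb) :
    get_permutations_that_sum_to_alt value nb beg end_
      = List.replicate (countB beg (if end_ < 0 then value else end_) nb.toNat value).toNat
          (((if end_ < 0 then value else end_) + 1) :: List.replicate (nb - 1).toNat beg) := by
  simp only [get_permutations_that_sum_to_alt]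
  have hguard : ¬((if end_ < 0 then value else end_) < beg ∨ nb * beg > value ∨
      nb * (if end_ < 0 then value else end_) < value) := by
    push_neg
    exact ⟨h1, h2, h3⟩
  rw [if_neg hguard]
  have htn : nb.toNat = (nb - 1).toNat + 1 := by omega
  rw [htn]
  have hbox : ∀ a ∈ List.replicate (nb - 1).toNat beg,
      beg ≤ a ∧ a ≤ (if end_ < 0 then value else end_) := by
    intro a ha
    rw [List.eq_of_mem_replicate ha]
    exact ⟨le_refl beg, h1⟩
  have hmain := loopB_main value beg (if end_ < 0 then value else end_) h1
    (rankOdo (if end_ < 0 then value else end_) beg (List.replicate ((nb - 1).toNat + 1 - 1) beg) + 1)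
    (List.replicate (nb - 1).toNat beg) beg 0 hbox (by simp)
  rw [List.replicate_succ, hmain, zero_add]
  simp only [List.length_replicate, List.reverse_replicate]
  rw [tailCnt_repB beg (if end_ < 0 then value else end_) h1]
  simp [List.reverse_append]

-- ===== VERDICT (by name: the statement is the Claim_ definition above) =====
theorem get_permutations_that_sum_to_spec : Claim_equal_get_permutations_that_sum_to := by
  intro value nb beg end_ _ hpre
  obtain ⟨h1, h2, h3, h4⟩ := hpre
  unfold Spec_get_permutations_that_sum_to
  rw [A_closed value nb beg end_ h1 h2 h3 h4, B_closed value nb beg end_ h1 h2 h3 h4]
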